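-- pv_equiv track=rewrite | github.com/alburlage/coursework | fundamentalsCS/homework/project1/project1Phase2.py | sortByDegree
-- ===== SOURCE A (Python) =====
-- def sortByDegree(wordList, nbrsList):
--     degrees = {}
--     for word in wordList:
--         degrees[word] = len(nbrsList[wordList.index(word)])
--     for i in range(1, len(wordList)):
--         current_word = wordList[i]
--         current_degree = degrees[current_word]
--         j = i - 1
--         while j >= 0 and degrees[wordList[j]] > current_degree:
--             wordList[j + 1] = wordList[j]
--             j -= 1
--         wordList[j + 1] = current_word
--
--     return wordList
-- ===== SOURCE B (Python) =====
-- def sortByDegree(wordList, nbrsList):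
--     degrees = {}
--     for i, word in enumerate(wordList):
--         if word not in degrees:
--             degrees[word] = len(nbrsList[i])
--     buckets = {}
--     for word in wordList:
--         buckets.setdefault(degrees[word], []).append(word)
--     result = []
--     for d in sorted(buckets):
--         result.extend(buckets[d])
--     wordList[:] = result
--     return wordList
-- ===== Notes on version B (the rewrite author's own statement) =====
-- stated objective: alternative
-- what changed: Replaces the repeated wordList.index scan plus in-place insertion sort by a one-pass first-occurrence degree table followed by a stable bucket sort (append each word to its degree's bucket, then concatenate buckets in ascending key order).
import Mathlib
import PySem

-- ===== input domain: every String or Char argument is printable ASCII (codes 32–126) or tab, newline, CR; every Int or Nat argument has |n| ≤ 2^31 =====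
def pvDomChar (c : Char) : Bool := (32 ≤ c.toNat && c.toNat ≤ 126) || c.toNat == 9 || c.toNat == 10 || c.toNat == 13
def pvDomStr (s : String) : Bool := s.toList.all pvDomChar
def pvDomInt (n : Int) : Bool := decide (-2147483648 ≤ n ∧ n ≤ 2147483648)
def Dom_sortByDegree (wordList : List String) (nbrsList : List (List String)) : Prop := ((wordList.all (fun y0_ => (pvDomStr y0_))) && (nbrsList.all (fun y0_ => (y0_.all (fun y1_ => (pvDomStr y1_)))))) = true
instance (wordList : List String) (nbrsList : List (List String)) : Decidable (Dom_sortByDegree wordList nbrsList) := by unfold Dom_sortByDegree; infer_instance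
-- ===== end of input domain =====

-- B replaces A's repeated wordList.index scans + in-place insertion sort by a one-pass
-- first-occurrence degree table and a stable bucket sort (a different algorithm of the
-- same observed cost). A mutates wordList in place and B performs the same
-- wordList[:] = result write-back; the equivalence proved here is about the RETURN value.


-- ===== PORT A =====
-- the while loop: j runs downward; state k = j + 1 (so k = 0 means j = -1 and the loop stops).
-- xs[j] / xs[j+1] are read/written with List.getD / List.set: both indices are provably in
-- range whenever the loop runs, so the defaults are never used.
def sortShiftA (degrees : PySem.Dict String Nat) (cur : Nat) : List String → Nat → List String × Nat
  | xs, 0 => (xs, 0)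
  | xs, k+1 =>
      if cur < degrees.getD (xs.getD k "") 0
      then sortShiftA degrees cur (xs.set (k+1) (xs.getD k "")) k
      else (xs, k+1)

-- degrees[word] = len(nbrsList[wordList.index(word)]): index? is some for every word of
-- wordList, so the '.getD 0' default is never used; pyGetD's default only matters outside Pre_.
def sortByDegree (wordList : List String) (nbrsList : List (List String)) : List String :=
  let degrees := wordList.foldl
    (fun d w => d.insert w (PySem.List.pyGetD nbrsList (((PySem.List.index? wordList w).getD 0 : Nat) : Int) []).length)
    PySem.Dict.empty
  (PySem.List.pyRange 1 (PySem.List.len wordList) 1).foldl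
    (fun xs i =>
      -- i ranges over 1 .. len-1, so i.toNat is exact
      let currentWord := xs.getD i.toNat ""
      let currentDegree := degrees.getD currentWord 0
      let sp := sortShiftA degrees currentDegree xs i.toNat
      sp.1.set sp.2 currentWord)
    wordList

-- ===== PORT B =====
def sortByDegree_alt (wordList : List String) (nbrsList : List (List String)) : List String :=
  let degrees := (PySem.List.enumerate wordList 0).foldl
    (fun d p => if d.contains p.2 then d
                else d.insert p.2 (PySem.List.pyGetD nbrsList p.1 []).length)
    PySem.Dict.empty
  let buckets := wordList.foldl
    (fun b w => b.modify (degrees.getD w 0) [] (fun l => l ++ [w]))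
    PySem.Dict.empty
  (PySem.List.sorted buckets.keys (fun x => x) false).foldl
    (fun acc d => acc ++ buckets.getD d []) []

-- ===== PRECONDITION & SPEC =====
-- Pre_ excludes exactly the inputs on which Python A raises IndexError:
-- some word's first-occurrence index is not a valid index of nbrsList.
def Pre_sortByDegree (wordList : List String) (nbrsList : List (List String)) : Prop :=
  ∀ w ∈ wordList, wordList.idxOf w < nbrsList.length
instance (wordList : List String) (nbrsList : List (List String)) : Decidable (Pre_sortByDegree wordList nbrsList) := by unfold Pre_sortByDegree; infer_instance
def pvWitness_sortByDegree : List String × List (List String) := (["ab", "c", "ab"], [["x"], [], ["y", "z"]])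
def Spec_sortByDegree (wordList : List String) (nbrsList : List (List String)) (out : List String) : Prop := out = sortByDegree_alt wordList nbrsList
instance (wordList : List String) (nbrsList : List (List String)) (out : List String) : Decidable (Spec_sortByDegree wordList nbrsList out) := by unfold Spec_sortByDegree; infer_instance

-- ===== CLAIM (what is proved, stated in full; the proofs are below) =====
def Claim_equal_sortByDegree : Prop := ∀ (wordList : List String) (nbrsList : List (List String)), Dom_sortByDegree wordList nbrsList → Pre_sortByDegree wordList nbrsList → Spec_sortByDegree wordList nbrsList (sortByDegree wordList nbrsList)

-- ===== LEMMAS AND PROOFS =====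

def insDeg (deg : String → Nat) (a : String) : List String → List String
  | [] => [a]
  | b :: l => if deg a < deg b then a :: b :: l else b :: insDeg deg a l

theorem mem_insDeg (deg : String → Nat) (a y : String) (l : List String) :
    y ∈ insDeg deg a l ↔ y = a ∨ y ∈ l := by
  induction l with
  | nil => simp [insDeg]
  | cons b t ih =>
    simp only [insDeg]
    split
    · show y ∈ a :: b :: t ↔ _
      simp [or_left_comm]
    · simp [ih]
      tauto

theorem insDeg_pairwise (deg : String → Nat) (a : String) (l : List String)
    (h : l.Pairwise (fun x y => deg x ≤ deg y)) :
    (insDeg deg a l).Pairwise (fun x y => deg x ≤ deg y) := by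
  induction l with
  | nil => simp [insDeg]
  | cons b t ih =>
    rcases List.pairwise_cons.mp h with ⟨hb, ht⟩
    simp only [insDeg]
    split
    · rename_i hlt
      refine List.pairwise_cons.mpr ⟨?_, h⟩
      intro y hy
      rcases hy with _ | hy
      · omega
      · exact le_trans (le_of_lt hlt) (hb _ (by assumption))
    · rename_i hnlt
      refine List.pairwise_cons.mpr ⟨?_, ih ht⟩
      intro y hy
      have : y = a ∨ y ∈ t := (mem_insDeg deg a y t).mp hy
      rcases this with rfl|hy'
      · omega
      · exact hb _ hy'

theorem insDeg_append_of_not_lt (deg : String → Nat) (a : String) (l1 l2 : List String)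
    (h : ∀ b ∈ l1, ¬ deg a < deg b) :
    insDeg deg a (l1 ++ l2) = l1 ++ insDeg deg a l2 := by
  induction l1 with
  | nil => simp
  | cons b t ih =>
    have hb := h b (by simp)
    simp only [List.cons_append, insDeg, if_neg hb]
    rw [ih (fun x hx => h x (by simp [hx]))]

theorem insDeg_eq_cons (deg : String → Nat) (a : String) (l : List String)
    (h : ∀ b ∈ l, deg a < deg b) : insDeg deg a l = a :: l := by
  cases l with
  | nil => rfl
  | cons b t => simp only [insDeg, if_pos (h b (by simp))]

theorem insDeg_eq_append (deg : String → Nat) (a : String) (l : List String)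
    (h : ∀ b ∈ l, ¬ deg a < deg b) : insDeg deg a l = l ++ [a] := by
  have := insDeg_append_of_not_lt deg a l [] h
  simpa [insDeg] using this

theorem insDeg_append_singleton_lt (deg : String → Nat) (a b : String) (q : List String)
    (h : deg a < deg b) : insDeg deg a (q ++ [b]) = insDeg deg a q ++ [b] := by
  induction q with
  | nil => simp [insDeg, if_pos h]
  | cons c s ih =>
    simp only [List.cons_append, insDeg]
    split
    · rfl
    · rw [ih]; simp

def sfold (deg : String → Nat) (xs : List String) : List String :=
  xs.foldl (fun acc x => insDeg deg x acc) []

theorem sfold_pairwise (deg : String → Nat) (xs : List String) :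
    (sfold deg xs).Pairwise (fun x y => deg x ≤ deg y) := by
  induction xs using List.reverseRecOn with
  | nil => simp [sfold]
  | append_singleton t a ih =>
    have : sfold deg (t ++ [a]) = insDeg deg a (sfold deg t) := by
      simp [sfold, List.foldl_append]
    rw [this]
    exact insDeg_pairwise deg a _ ih

theorem length_insDeg (deg : String → Nat) (a : String) (l : List String) :
    (insDeg deg a l).length = l.length + 1 := by
  induction l with
  | nil => rfl
  | cons b t ih => simp only [insDeg]; split <;> simp [ih]

theorem length_sfold (deg : String → Nat) (xs : List String) :
    (sfold deg xs).length = xs.length := by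
  induction xs using List.reverseRecOn with
  | nil => rfl
  | append_singleton t a ih =>
    simp [sfold, List.foldl_append] at *
    simp [length_insDeg, ih]

theorem getD_append_length (q : List String) (b d : String) (t : List String) :
    (q ++ b :: t).getD q.length d = b := by
  simp [List.getD, List.getElem?_append_right (le_refl q.length)]

theorem set_append_length (s : List String) (c v : String) (r : List String) :
    (s ++ c :: r).set s.length v = s ++ v :: r := by
  rw [List.set_append_right _ _ (le_refl s.length)]
  simp

theorem shift_spec (D : PySem.Dict String Nat) (a : String) :
    ∀ (p : List String) (c : String) (r : List String),
      p.Pairwise (fun x y => D.getD x 0 ≤ D.getD y 0) →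
      (let sp := sortShiftA D (D.getD a 0) (p ++ c :: r) p.length
       sp.1.set sp.2 a) = insDeg (fun w => D.getD w 0) a p ++ r := by
  intro p
  induction p using List.reverseRecOn with
  | nil => intro c r _; simp [sortShiftA, insDeg]
  | append_singleton q b ih =>
    intro c r hp
    have hq : q.Pairwise (fun x y => D.getD x 0 ≤ D.getD y 0) :=
      hp.sublist (List.sublist_append_left q [b])
    have hlen : (q ++ [b]).length = q.length + 1 := by simp
    have hget : ((q ++ [b]) ++ c :: r).getD q.length "" = b := by
      have : (q ++ [b]) ++ c :: r = q ++ b :: (c :: r) := by simp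
      rw [this, getD_append_length]
    simp only [hlen, sortShiftA, hget]
    by_cases hlt : D.getD a 0 < D.getD b 0
    · rw [if_pos hlt]
      have hset : (((q ++ [b]) ++ c :: r)).set (q.length + 1) b = q ++ b :: (b :: r) := by
        have h1 : (q ++ [b]) ++ c :: r = (q ++ [b]) ++ c :: r := rfl
        have : ((q ++ [b]) ++ c :: r).set (q ++ [b]).length b = (q ++ [b]) ++ b :: r :=
          set_append_length (q ++ [b]) c b r
        simpa [hlen] using this
      rw [hset]
      have := ih b (b :: r) hq
      simp only at this
      rw [this]
      rw [insDeg_append_singleton_lt _ _ _ _ hlt]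
      simp
    · rw [if_neg hlt]
      simp only
      have hset : (((q ++ [b]) ++ c :: r)).set (q.length + 1) a = (q ++ [b]) ++ a :: r := by
        have := set_append_length (q ++ [b]) c a r
        simpa [hlen] using this
      rw [hset]
      have hall : ∀ y ∈ q ++ [b], ¬ D.getD a 0 < D.getD y 0 := by
        intro y hy
        rcases List.mem_append.mp hy with hy | hy
        · have hyb : D.getD y 0 ≤ D.getD b 0 := by
            have := List.pairwise_append.mp hp
            exact this.2.2 y hy b (by simp)
          omega
        · simp at hy; subst hy; omega
      rw [insDeg_eq_append _ _ _ hall]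
      simp

theorem sfold_append_singleton (deg : String → Nat) (xs : List String) (a : String) :
    sfold deg (xs ++ [a]) = insDeg deg a (sfold deg xs) := by
  simp [sfold, List.foldl_append]

theorem outer_spec (D : PySem.Dict String Nat) (wl : List String) :
    ∀ (m : Nat), 1 ≤ m → m ≤ wl.length →
      (PySem.List.pyRange 1 (m : Int) 1).foldl
        (fun xs i =>
          let currentWord := xs.getD i.toNat ""
          let currentDegree := D.getD currentWord 0
          let sp := sortShiftA D currentDegree xs i.toNat
          sp.1.set sp.2 currentWord) wl
      = sfold (fun w => D.getD w 0) (wl.take m) ++ wl.drop m := by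
  intro m
  induction m with
  | zero => omega
  | succ m ihm =>
    intro h1 h2
    by_cases hm : m = 0
    · subst hm
      rw [show ((1:Nat) : Int) = 1 by norm_num, PySem.List.pyRange_one_eq_nil (by norm_num)]
      simp only [List.foldl_nil]
      obtain ⟨x, t, rfl⟩ : ∃ x t, wl = x :: t := by
        cases wl with
        | nil => simp at h2
        | cons x t => exact ⟨x, t, rfl⟩
      simp [sfold, insDeg]
    · have h1m : 1 ≤ m := by omega
      have h2m : m ≤ wl.length := by omega
      have hrange : PySem.List.pyRange 1 ((m : Int) + 1) 1
          = PySem.List.pyRange 1 (m : Int) 1 ++ [(m : Int)] :=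
        PySem.List.pyRange_one_succ_right (by exact_mod_cast h1m)
      rw [show ((m + 1 : Nat) : Int) = (m : Int) + 1 by push_cast; ring, hrange,
        List.foldl_append]
      rw [ihm h1m h2m]
      simp only [List.foldl_cons, List.foldl_nil]
      have hmlt : m < wl.length := h2
      have hdrop : wl.drop m = wl[m] :: wl.drop (m + 1) := List.drop_eq_getElem_cons hmlt
      have hlenS : (sfold (fun w => D.getD w 0) (wl.take m)).length = m := by
        rw [length_sfold]; simp [h2m]
      have htoNat : ((m : Int)).toNat = m := by simp
      simp only [htoNat, hdrop]
      have hget : ∀ (b : String) (t : List String),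
          (sfold (fun w => D.getD w 0) (wl.take m) ++ b :: t).getD m "" = b := by
        intro b t
        have h := getD_append_length (sfold (fun w => D.getD w 0) (wl.take m)) b "" t
        rw [hlenS] at h
        exact h
      rw [hget]
      have hs := shift_spec D wl[m] (sfold (fun w => D.getD w 0) (wl.take m)) wl[m]
        (wl.drop (m + 1)) (sfold_pairwise _ _)
      simp only [hlenS] at hs
      rw [hs]
      have htake : wl.take (m + 1) = wl.take m ++ [wl[m]] := by
        rw [List.take_succ]
        simp [List.getElem?_eq_getElem hmlt]
      rw [htake, sfold_append_singleton]

theorem portA_eq_sfold (wl : List String) (nl : List (List String)) :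
    sortByDegree wl nl
      = sfold (fun w =>
          (wl.foldl (fun d x => d.insert x
              (PySem.List.pyGetD nl (((PySem.List.index? wl x).getD 0 : Nat) : Int) []).length)
            PySem.Dict.empty).getD w 0) wl := by
  unfold sortByDegree
  simp only
  cases hwl : wl with
  | nil => simp [PySem.List.len, sfold]
  | cons x t =>
    rw [← hwl]
    have hne : wl.length ≠ 0 := by rw [hwl]; simp
    have hlen : PySem.List.len wl = (wl.length : Int) := PySem.List.len_eq wl
    rw [hlen]
    have := outer_spec (wl.foldl (fun d x => d.insert x
        (PySem.List.pyGetD nl (((PySem.List.index? wl x).getD 0 : Nat) : Int) []).length)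
      PySem.Dict.empty) wl wl.length (by omega) (le_refl _)
    rw [this]
    simp

theorem foldl_insert_const_get? (g : String → Nat) (wl : List String) :
    ∀ (d0 : PySem.Dict String Nat) (w : String),
      (wl.foldl (fun d x => d.insert x (g x)) d0).get? w
        = if w ∈ wl then some (g w) else d0.get? w := by
  induction wl with
  | nil => simp
  | cons x t ih =>
    intro d0 w
    simp only [List.foldl_cons, ih]
    by_cases hw : w ∈ t
    · simp [hw]
    · by_cases hwx : w = x
      · subst hwx
        simp [hw, PySem.Dict.get?_insert_self]
      · simp [hw, hwx, PySem.Dict.get?_insert_of_ne _ _ hwx]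

theorem foldl_enum_get? (nl : List (List String)) :
    ∀ (l : List (Int × String)) (d : PySem.Dict String Nat) (w : String),
      (l.foldl (fun d p => if d.contains p.2 then d
                  else d.insert p.2 (PySem.List.pyGetD nl p.1 []).length) d).get? w
        = (d.get? w).or ((l.find? (fun p => p.2 == w)).map
            (fun p => (PySem.List.pyGetD nl p.1 []).length)) := by
  intro l
  induction l with
  | nil => simp
  | cons p t ih =>
    intro d w
    simp only [List.foldl_cons, List.find?_cons]
    by_cases hpw : p.2 = w
    · have hbeq : (p.2 == w) = true := by simp [hpw]
      rw [hbeq]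
      simp only [ih]
      by_cases hc : d.contains p.2 = true
      · rw [if_pos hc]
        have : (d.get? w).isSome := by
          rw [PySem.Dict.contains_eq_isSome_get?, hpw] at hc
          exact hc
        rcases Option.isSome_iff_exists.mp this with ⟨v, hv⟩
        simp [hv]
      · rw [if_neg hc]
        have hgd : d.get? w = none := by
          rw [PySem.Dict.contains_eq_isSome_get?, hpw] at hc
          simpa using hc
        have h2 : (d.insert p.2 ((PySem.List.pyGetD nl p.1 []).length)).get? w
            = some ((PySem.List.pyGetD nl p.1 []).length) := by
          rw [hpw]
          exact PySem.Dict.get?_insert_self d w _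
        simp [h2, hgd]
    · have hbeq : (p.2 == w) = false := by simp [hpw]
      rw [hbeq]
      simp only [ih]
      have hne : w ≠ p.2 := fun h => hpw h.symm
      by_cases hc : d.contains p.2 = true
      · rw [if_pos hc]
      · rw [if_neg hc, PySem.Dict.get?_insert_of_ne _ _ hne]

theorem find?_enumerate (wl : List String) :
    ∀ (s : Int) (w : String),
      (PySem.List.enumerate wl s).find? (fun p => p.2 == w)
        = (PySem.List.index? wl w).map (fun k => (s + k, w)) := by
  induction wl with
  | nil => simp [PySem.List.enumerate_nil]
  | cons x t ih =>
    intro s w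
    rw [PySem.List.enumerate_cons, List.find?_cons]
    by_cases hxw : x = w
    · subst hxw
      have h0 : PySem.List.index? (x :: t) x = some 0 := PySem.List.index?_cons_self x t
      rw [h0]
      simp
    · have hb : ((s, x).2 == w) = false := by simp [hxw]
      rw [hb, ih (s + 1) w, PySem.List.index?_cons_of_ne t hxw]
      cases h : PySem.List.index? t w with
      | none => simp
      | some k =>
        show ((Option.map (fun k => (s + 1 + (k:Int), w)) (some k : Option Nat)) : Option (Int × String))
            = Option.map (fun j => (s + j, w)) (Option.map (fun x => x + 1) (some k : Option Nat))
        show some (s + 1 + (k:Int), w) = some (s + (((k + 1 : Nat)):Int), w)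
        congr 1
        rw [Prod.mk.injEq]
        refine ⟨by push_cast; ring, rfl⟩

theorem deg_eq (wl : List String) (nl : List (List String)) :
    (fun w => (wl.foldl (fun d x => d.insert x
        (PySem.List.pyGetD nl (((PySem.List.index? wl x).getD 0 : Nat) : Int) []).length)
      PySem.Dict.empty).getD w 0)
    = (fun w => ((PySem.List.enumerate wl 0).foldl
        (fun d p => if d.contains p.2 then d
            else d.insert p.2 (PySem.List.pyGetD nl p.1 []).length)
        PySem.Dict.empty).getD w 0) := by
  funext w
  rw [PySem.Dict.getD_eq_get?_getD, PySem.Dict.getD_eq_get?_getD]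
  rw [foldl_insert_const_get?, foldl_enum_get?, find?_enumerate]
  cases h : PySem.List.index? wl w with
  | none =>
    have hw : w ∉ wl := (PySem.List.index?_eq_none_iff wl w).mp h
    simp [hw]
  | some k =>
    have hw : w ∈ wl := by
      have : (PySem.List.index? wl w).isSome := by rw [h]; rfl
      exact (PySem.List.index?_isSome_iff wl w).mp this
    rw [if_pos hw]
    simp

theorem portB_eq_flatMap (wl : List String) (nl : List (List String)) :
    sortByDegree_alt wl nl
      = (PySem.List.sorted (PySem.Set.ofList (wl.map (fun w =>
            ((PySem.List.enumerate wl 0).foldl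
              (fun d p => if d.contains p.2 then d
                  else d.insert p.2 (PySem.List.pyGetD nl p.1 []).length)
              PySem.Dict.empty).getD w 0))) (fun x => x) false).flatMap
          (fun c => wl.filter (fun w =>
            ((PySem.List.enumerate wl 0).foldl
              (fun d p => if d.contains p.2 then d
                  else d.insert p.2 (PySem.List.pyGetD nl p.1 []).length)
              PySem.Dict.empty).getD w 0 == c)) := by
  unfold sortByDegree_alt
  simp only
  generalize hD : (PySem.List.enumerate wl 0).foldl
      (fun d p => if d.contains p.2 then d
          else d.insert p.2 (PySem.List.pyGetD nl p.1 []).length)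
      PySem.Dict.empty = D
  generalize hB : wl.foldl (fun b w => b.modify (D.getD w 0) [] (fun l => l ++ [w]))
      PySem.Dict.empty = B
  have hBmap : B = (wl.map (fun w => (D.getD w 0, w))).foldl
      (fun d p => d.modify p.1 [] (fun l => l ++ [p.2])) PySem.Dict.empty := by
    rw [← hB, List.foldl_map]
  have hkeys : B.keys = PySem.Set.ofList (wl.map (fun w => D.getD w 0)) := by
    rw [← hB]
    rw [PySem.Dict.keys_foldl_modify_key wl (fun w => D.getD w 0) []
      (fun _ x => fun l => l ++ [x]) PySem.Dict.empty]
    rw [PySem.Dict.keys_empty]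
    rfl
  have hgetD : (fun c => B.getD c []) = (fun c => wl.filter (fun w => D.getD w 0 == c)) := by
    funext c
    rw [hBmap, PySem.Dict.getD_foldl_modify_append]
    rw [List.filter_map, List.map_map]
    simp [Function.comp_def]
  rw [hkeys, PySem.List.foldl_append_eq_flatMap, hgetD]
  simp

theorem pairwise_lt_decomp (K : List Nat) (da : Nat) (hp : K.Pairwise (· < ·)) :
    K = K.filter (fun d => d < da) ++ K.filter (fun d => d = da)
        ++ K.filter (fun d => da < d) := by
  induction K with
  | nil => rfl
  | cons k t ih =>
    rcases List.pairwise_cons.mp hp with ⟨hall, ht⟩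
    rcases Nat.lt_trichotomy k da with hk | hk | hk
    · simp only [List.filter_cons, decide_eq_true_eq]
      rw [if_pos hk, if_neg (by omega), if_neg (by omega)]
      simpa using ih ht
    · subst hk
      have h1 : t.filter (fun d => d < k) = [] :=
        List.filter_eq_nil_iff.mpr (fun d hd => by have := hall d hd; simp; omega)
      have h2 : t.filter (fun d => d = k) = [] :=
        List.filter_eq_nil_iff.mpr (fun d hd => by have := hall d hd; simp; omega)
      have h3 : t.filter (fun d => k < d) = t :=
        List.filter_eq_self.mpr (fun d hd => by have := hall d hd; simp; omega)
      simp [List.filter_cons, h1, h2, h3]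
    · have h1 : (k :: t).filter (fun d => d < da) = [] :=
        List.filter_eq_nil_iff.mpr (fun d hd => by
          rcases List.mem_cons.mp hd with rfl | hd
          · simp; omega
          · have := hall d hd; simp; omega)
      have h2 : (k :: t).filter (fun d => d = da) = [] :=
        List.filter_eq_nil_iff.mpr (fun d hd => by
          rcases List.mem_cons.mp hd with rfl | hd
          · simp; omega
          · have := hall d hd; simp; omega)
      have h3 : (k :: t).filter (fun d => da < d) = k :: t :=
        List.filter_eq_self.mpr (fun d hd => by
          rcases List.mem_cons.mp hd with rfl | hd
          · simp; omega
          · have := hall d hd; simp; omega)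
      rw [h1, h2, h3]
      rfl

theorem nodup_filter_eq (K : List Nat) (da : Nat) (hnd : K.Nodup) :
    K.filter (fun d => d = da) = if da ∈ K then [da] else [] := by
  induction K with
  | nil => simp
  | cons k t ih =>
    rcases List.nodup_cons.mp hnd with ⟨hk, ht⟩
    by_cases hkda : k = da
    · subst hkda
      simp only [List.filter_cons, decide_true, if_pos rfl]
      rw [ih ht, if_neg hk]
      simp
    · simp only [List.filter_cons, decide_eq_true_eq, if_neg hkda]
      rw [ih ht]
      have hdk : da ≠ k := fun h => hkda h.symm
      by_cases hmem : da ∈ t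
      · simp [hmem, hdk]
      · simp [hmem, hdk]

theorem ofList_append_singleton {α : Type} [BEq α] [LawfulBEq α] (L : List α) (da : α) :
    PySem.Set.ofList (L ++ [da])
      = if da ∈ L then PySem.Set.ofList L else PySem.Set.ofList L ++ [da] := by
  rw [PySem.Set.ofList_eq_foldl, List.foldl_append]
  simp only [List.foldl_cons, List.foldl_nil]
  rw [← PySem.Set.ofList_eq_foldl]
  by_cases hmem : da ∈ L
  · rw [if_pos hmem]
    simp [PySem.Set.add, PySem.Set.contains, (PySem.Set.mem_ofList L da).mpr hmem]
  · rw [if_neg hmem]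
    have : da ∉ PySem.Set.ofList L := fun h => hmem ((PySem.Set.mem_ofList L da).mp h)
    simp [PySem.Set.add, PySem.Set.contains, this]

theorem flatMap_sorted_eq_sfold (deg : String → Nat) (xs : List String) :
    (PySem.List.sorted (PySem.Set.ofList (xs.map deg)) (fun x => x) false).flatMap
        (fun c => xs.filter (fun w => deg w == c))
      = sfold deg xs := by
  induction xs using List.reverseRecOn with
  | nil => rfl
  | append_singleton xs a ih =>
    set da := deg a with hda
    set L := xs.map deg with hL
    set K := PySem.List.sorted (PySem.Set.ofList L) (fun x => x) false with hK
    have hKp : K.Pairwise (· < ·) := PySem.List.sorted_ofList_pairwise_lt L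
    have hKnd : K.Nodup := hKp.nodup
    have hmemK : ∀ d, d ∈ K ↔ d ∈ L := by
      intro d
      rw [hK, PySem.List.mem_sorted, PySem.Set.mem_ofList]
    set K1 := K.filter (fun d => d < da) with hK1
    set Kmid := K.filter (fun d => d = da) with hKmid
    set K2 := K.filter (fun d => da < d) with hK2
    have hdecomp : K = K1 ++ Kmid ++ K2 := pairwise_lt_decomp K da hKp
    have hK1lt : ∀ d ∈ K1, d < da := by
      intro d hd; have := List.of_mem_filter hd; simpa using this
    have hK2gt : ∀ d ∈ K2, da < d := by
      intro d hd; have := List.of_mem_filter hd; simpa using this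
    -- the new sorted key list
    have hK' : PySem.List.sorted (PySem.Set.ofList ((xs ++ [a]).map deg)) (fun x => x) false
        = K1 ++ da :: K2 := by
      rw [List.map_append]
      show PySem.List.sorted (PySem.Set.ofList (L ++ [da])) (fun x => x) false = K1 ++ da :: K2
      apply PySem.List.sorted_eq_of_perm_of_pairwise_lt
      · rw [ofList_append_singleton]
        by_cases hmem : da ∈ L
        · rw [if_pos hmem]
          have hKm : Kmid = [da] := by
            rw [hKmid, nodup_filter_eq K da hKnd, if_pos ((hmemK da).mpr hmem)]
          have : K1 ++ da :: K2 = K := by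
            rw [hdecomp, hKm]; simp
          rw [this]
          exact PySem.List.sorted_perm _ _ _
        · rw [if_neg hmem]
          have hKm : Kmid = [] := by
            rw [hKmid, nodup_filter_eq K da hKnd,
              if_neg (fun h => hmem ((hmemK da).mp h))]
          have hKK : K = K1 ++ K2 := by rw [hdecomp, hKm]; simp
          have p1 : (K1 ++ da :: K2).Perm (da :: K) := by
            rw [hKK]; exact List.perm_middle
          have p2 : (da :: K).Perm (da :: PySem.Set.ofList L) :=
            (PySem.List.sorted_perm _ _ _).cons da
          have p3 : (da :: PySem.Set.ofList L).Perm (PySem.Set.ofList L ++ [da]) :=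
            (List.perm_append_singleton da _).symm
          exact p1.trans (p2.trans p3)
      · apply List.pairwise_append.mpr
        refine ⟨hKp.filter _, List.pairwise_cons.mpr ⟨hK2gt, hKp.filter _⟩, ?_⟩
        intro x hx y hy
        have hx' := hK1lt x hx
        rcases List.mem_cons.mp hy with rfl | hy'
        · exact hx'
        · exact lt_trans hx' (hK2gt y hy')
    rw [hK', sfold_append_singleton, ← ih]
    have hf' : ∀ c, (xs ++ [a]).filter (fun w => deg w == c)
        = xs.filter (fun w => deg w == c) ++ (if da = c then [a] else []) := by
      intro c
      rw [List.filter_append, List.filter_singleton]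
      by_cases hc : da = c
      · simp [← hda, hc]
      · have : (deg a == c) = false := by simp [← hda, hc]
        simp [this, hc]
    have hmemf : ∀ c b, b ∈ xs.filter (fun w => deg w == c) → deg b = c := by
      intro c b hb
      have := List.of_mem_filter hb
      simpa using this
    have hcongr1 : K1.flatMap (fun c => (xs ++ [a]).filter (fun w => deg w == c))
        = K1.flatMap (fun c => xs.filter (fun w => deg w == c)) := by
      apply List.flatMap_congr
      intro c hc
      rw [hf' c, if_neg (by have := hK1lt c hc; omega)]
      simp
    have hcongr2 : K2.flatMap (fun c => (xs ++ [a]).filter (fun w => deg w == c))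
        = K2.flatMap (fun c => xs.filter (fun w => deg w == c)) := by
      apply List.flatMap_congr
      intro c hc
      rw [hf' c, if_neg (by have := hK2gt c hc; omega)]
      simp
    have hKmidf : Kmid.flatMap (fun c => xs.filter (fun w => deg w == c))
        = xs.filter (fun w => deg w == da) := by
      by_cases hmem : da ∈ L
      · have hKm : Kmid = [da] := by
          rw [hKmid, nodup_filter_eq K da hKnd, if_pos ((hmemK da).mpr hmem)]
        rw [hKm]
        simp
      · have hKm : Kmid = [] := by
          rw [hKmid, nodup_filter_eq K da hKnd, if_neg (fun h => hmem ((hmemK da).mp h))]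
        have hfda : xs.filter (fun w => deg w == da) = [] := by
          apply List.filter_eq_nil_iff.mpr
          intro w hw
          have : deg w ∈ L := by rw [hL]; exact List.mem_map_of_mem hw
          simp only [beq_iff_eq]
          intro hEq
          exact hmem (hEq ▸ this)
        rw [hKm, hfda]
        rfl
    -- LHS
    rw [List.flatMap_append, List.flatMap_cons, hcongr1, hcongr2, hf' da, if_pos rfl]
    -- RHS
    conv_rhs => rw [hdecomp, List.flatMap_append, List.flatMap_append]
    have hnotlt : ∀ b ∈ K1.flatMap (fun c => xs.filter (fun w => deg w == c))
        ++ Kmid.flatMap (fun c => xs.filter (fun w => deg w == c)), ¬ deg a < deg b := by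
      intro b hb
      rcases List.mem_append.mp hb with hb | hb
      · rcases List.mem_flatMap.mp hb with ⟨c, hc, hbc⟩
        have h1 := hK1lt c hc
        have h2 := hmemf c b hbc
        omega
      · rcases List.mem_flatMap.mp hb with ⟨c, hc, hbc⟩
        have h1 : c = da := by have := List.of_mem_filter hc; simpa using this
        have h2 := hmemf c b hbc
        omega
    have hgt : ∀ b ∈ K2.flatMap (fun c => xs.filter (fun w => deg w == c)), deg a < deg b := by
      intro b hb
      rcases List.mem_flatMap.mp hb with ⟨c, hc, hbc⟩
      have h1 := hK2gt c hc
      have h2 := hmemf c b hbc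
      omega
    conv_rhs => rw [List.append_assoc, ← List.append_assoc,
      insDeg_append_of_not_lt deg a _ _ hnotlt, insDeg_eq_cons deg a _ hgt]
    rw [hKmidf]
    simp

-- ===== VERDICT (by name: the statement is the Claim_ definition above) =====
theorem sortByDegree_spec : Claim_equal_sortByDegree := by
  intro wl nl _ _
  unfold Spec_sortByDegree
  rw [portA_eq_sfold, portB_eq_flatMap, flatMap_sorted_eq_sfold, deg_eq]
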